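-- pv_equiv track=rewrite | github.com/Preko700/Recursividad-Python | Recursividad.py | DP
-- ===== SOURCE A (Python) =====
-- def DP(d, n1, res1, res2):
--     if n1 == 0:
--         return res1, res2
--     else:
--         ultimo_digito = n1 % 10
--         if ultimo_digito >= d:
--             res1 += ultimo_digito * 10**res1
--         else:
--             res2 += ultimo_digito * 10**res2
--         return DP(d, n1 // 10, res1, res2)
-- ===== SOURCE B (Python) =====
-- def DP(d, n1, res1, res2):
--     # Two-phase: extract the digit list (low to high) first, then fold the
--     # threshold accumulation over it.
--     digits = []
--     while n1 != 0:
--         digits.append(n1 % 10)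
--         n1 //= 10
--     for u in digits:
--         if u >= d:
--             res1 += u * 10 ** res1
--         else:
--             res2 += u * 10 ** res2
--     return res1, res2
-- ===== Notes on version B (the rewrite author's own statement) =====
-- stated objective: alternative
-- what changed: Replaces the tail recursion that interleaves digit extraction with accumulation by a two-phase iterative version: first build the list of digits of n1 (low to high), then fold the threshold accumulation over that list.
import Mathlib
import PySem

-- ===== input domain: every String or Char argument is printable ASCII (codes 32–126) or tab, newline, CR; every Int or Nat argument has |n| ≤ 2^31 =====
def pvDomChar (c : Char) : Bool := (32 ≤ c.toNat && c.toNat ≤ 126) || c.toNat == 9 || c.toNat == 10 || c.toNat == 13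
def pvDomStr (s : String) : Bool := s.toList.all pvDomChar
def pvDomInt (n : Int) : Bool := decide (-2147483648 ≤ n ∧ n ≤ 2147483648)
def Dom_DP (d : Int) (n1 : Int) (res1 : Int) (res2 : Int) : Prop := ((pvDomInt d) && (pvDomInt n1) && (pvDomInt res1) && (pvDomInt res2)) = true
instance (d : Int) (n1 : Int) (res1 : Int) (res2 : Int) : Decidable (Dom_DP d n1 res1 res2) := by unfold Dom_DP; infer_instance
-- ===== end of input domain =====

-- B replaces A's tail recursion (digit extraction interleaved with accumulation) by a
-- two-phase version: build the digit list low-to-high, then fold the threshold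
-- accumulation over it; same cost ("alternative").


-- ===== PORT A =====
-- A's recursion, with fuel n1.natAbs (enough steps for every n1 ≥ 0, where Python A
-- terminates). `10 ** res` is ported as `10 ^ res.toNat`, exact for res ≥ 0 (Pre_);
-- for negative exponents Python yields a float, outside Pre_.
def DPgo (d : Int) : Nat → Int → Int → Int → Int × Int
  | 0, _, res1, res2 => (res1, res2)
  | fuel + 1, n1, res1, res2 =>
    if n1 = 0 then (res1, res2)
    else
      let ultimo_digito := PySem.Int.mod n1 10
      if ultimo_digito ≥ d then
        DPgo d fuel (PySem.Int.floordiv n1 10) (res1 + ultimo_digito * 10 ^ res1.toNat) res2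
      else
        DPgo d fuel (PySem.Int.floordiv n1 10) res1 (res2 + ultimo_digito * 10 ^ res2.toNat)

def DP (d : Int) (n1 : Int) (res1 : Int) (res2 : Int) : Int × Int :=
  DPgo d n1.natAbs n1 res1 res2

-- ===== PORT B =====
-- Phase 1 of Source B: the while-loop collecting digits of n1 low-to-high (same fuel scheme).
def digitsGo : Nat → Int → List Int
  | 0, _ => []
  | fuel + 1, n1 =>
    if n1 = 0 then []
    else PySem.Int.mod n1 10 :: digitsGo fuel (PySem.Int.floordiv n1 10)

-- Phase 2 of Source B: the for-loop over the digit list, as a fold over the accumulator pair.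
def DPstep (d : Int) (p : Int × Int) (u : Int) : Int × Int :=
  if u ≥ d then (p.1 + u * 10 ^ p.1.toNat, p.2) else (p.1, p.2 + u * 10 ^ p.2.toNat)

def DP_alt (d : Int) (n1 : Int) (res1 : Int) (res2 : Int) : Int × Int :=
  (digitsGo n1.natAbs n1).foldl (DPstep d) (res1, res2)

-- ===== PRECONDITION & SPEC =====
-- Python A returns an int pair exactly when n1 ≥ 0 (negative n1 recurses forever) and any
-- accumulator whose branch fires is non-negative when it first fires (10**res is a float
-- for res < 0, so A returns floats there): res1's branch fires on a digit ≥ d, res2's on a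
-- digit < d, and a non-negative accumulator stays non-negative.
def Pre_DP (d : Int) (n1 : Int) (res1 : Int) (res2 : Int) : Prop :=
  0 ≤ n1 ∧ (0 ≤ res1 ∨ ∀ u ∈ Nat.digits 10 n1.toNat, (u : Int) < d)
         ∧ (0 ≤ res2 ∨ ∀ u ∈ Nat.digits 10 n1.toNat, d ≤ (u : Int))
instance (d : Int) (n1 : Int) (res1 : Int) (res2 : Int) : Decidable (Pre_DP d n1 res1 res2) := by unfold Pre_DP; infer_instance
def pvWitness_DP : Int × Int × Int × Int := (5, 123, 0, 0)

def Spec_DP (d : Int) (n1 : Int) (res1 : Int) (res2 : Int) (out : Int × Int) : Prop := out = DP_alt d n1 res1 res2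
instance (d : Int) (n1 : Int) (res1 : Int) (res2 : Int) (out : Int × Int) : Decidable (Spec_DP d n1 res1 res2 out) := by unfold Spec_DP; infer_instance

-- ===== CLAIM (what is proved, stated in full; the proofs are below) =====
def Claim_equal_DP : Prop := ∀ (d : Int) (n1 : Int) (res1 : Int) (res2 : Int), Dom_DP d n1 res1 res2 → Pre_DP d n1 res1 res2 → Spec_DP d n1 res1 res2 (DP d n1 res1 res2)

-- ===== LEMMAS AND PROOFS =====

-- A's interleaved recursion equals B's fold over the separately-extracted digit list
-- (for any fuel; both ports use fuel n1.natAbs).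
theorem DPgo_eq_foldl (d : Int) (fuel : Nat) :
    ∀ (n1 res1 res2 : Int),
      DPgo d fuel n1 res1 res2 = (digitsGo fuel n1).foldl (DPstep d) (res1, res2) := by
  induction fuel with
  | zero => intro n1 res1 res2; simp [DPgo, digitsGo]
  | succ fuel ih =>
    intro n1 res1 res2
    by_cases h : n1 = 0
    · simp [DPgo, digitsGo, h]
    · simp only [DPgo, digitsGo, h, if_false, ih, List.foldl_cons, DPstep]
      split <;> rfl

-- ===== VERDICT (by name: the statement is the Claim_ definition above) =====
theorem DP_spec : Claim_equal_DP := by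
  intro d n1 res1 res2 _ _
  show DP d n1 res1 res2 = DP_alt d n1 res1 res2
  simp [DP, DP_alt, DPgo_eq_foldl]
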